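-- pv_equiv track=rewrite | github.com/smilesometimes/Poetry-Form-Checker | poetry_functions.py | get_rhyme_scheme_info
-- ===== SOURCE A (Python) =====
-- def get_rhyme_scheme_info(rhyme_scheme):
--     """(list of str ) -> tuple of (list of str, dict of {str :list of int})
--
--     Rhyme_scheme is a list of letter that indicates the rhyme scheme. Return
--     a two-item tuple. The list of str denotes appearance order of characters
--     and the dict record the character's index.
--
--     >>> get_rhyme_scheme_info(['A', 'B', 'A'])
--     (['A', 'B'], {'A': [0, 2], 'B': [1]})
--     """
--
--     histogram = dict()
--     ordered_rhyme = []
--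
--     # The appearance order of characters is recorded in ordered_rhyme.
--     for i in range(len(rhyme_scheme)):
--         if rhyme_scheme[i] not in histogram:
--             histogram[rhyme_scheme[i]] = [i]
--             ordered_rhyme.append(rhyme_scheme[i])
--         else:
--             histogram[rhyme_scheme[i]] .append(i)
--
--     return ordered_rhyme,histogram
-- ===== SOURCE B (Python) =====
-- def get_rhyme_scheme_info(rhyme_scheme):
--     # stage 1: appearance order = first-occurrence dedup
--     ordered_rhyme = list(dict.fromkeys(rhyme_scheme))
--     # stage 2: for each distinct character, rescan the input for its indices
--     histogram = {ch: [i for i, c in enumerate(rhyme_scheme) if c == ch]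
--                  for ch in ordered_rhyme}
--     return ordered_rhyme, histogram
-- ===== Notes on version B (the rewrite author's own statement) =====
-- stated objective: alternative
-- what changed: B replaces A's single incremental pass (membership-tested dict of growing index lists plus a maintained parallel list) by two staged passes: a first-occurrence dedup gives the appearance order, then each distinct character's index list is computed by its own full scan of the input (a dict comprehension with a nested filter), so no dict entry is ever updated.
import Mathlib
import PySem

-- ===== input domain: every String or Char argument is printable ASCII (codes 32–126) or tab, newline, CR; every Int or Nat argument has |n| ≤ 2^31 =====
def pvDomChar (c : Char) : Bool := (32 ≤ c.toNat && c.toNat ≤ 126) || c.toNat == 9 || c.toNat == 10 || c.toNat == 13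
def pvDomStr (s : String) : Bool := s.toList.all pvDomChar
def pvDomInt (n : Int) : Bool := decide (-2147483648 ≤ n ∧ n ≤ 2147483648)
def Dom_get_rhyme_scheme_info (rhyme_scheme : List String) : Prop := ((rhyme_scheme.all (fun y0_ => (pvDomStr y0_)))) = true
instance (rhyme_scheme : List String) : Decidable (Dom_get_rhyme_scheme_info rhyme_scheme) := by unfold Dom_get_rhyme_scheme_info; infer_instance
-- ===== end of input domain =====

-- B replaces A's single incremental pass (membership branch + maintained parallel list)
-- by two staged passes: first-occurrence dedup for the order, then one scan per distinct
-- character for its index list (alternative algorithm, no dict entry ever updated).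

-- ===== PORT A =====
-- index loop over range(len(rhyme_scheme)); the state is (histogram, ordered_rhyme)
def get_rhyme_scheme_info (rhyme_scheme : List String) : List String × (List (String × List Int)) :=
  let st := (PySem.List.pyRange 0 rhyme_scheme.length 1).foldl
    (fun (st : PySem.Dict String (List Int) × List String) i =>
      let s := PySem.List.pyGetD rhyme_scheme i ""   -- i is always in range
      if st.1.contains s = false then
        (st.1.insert s [i], st.2 ++ [s])
      else
        (st.1.modify s [] (fun l => l ++ [i]), st.2))
    (PySem.Dict.empty, [])
  (st.2, st.1.items)

-- ===== PORT B =====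
-- the inner comprehension [i for i, c in enumerate(rhyme_scheme) if c == ch]
def pvIdxs (rhyme_scheme : List String) (ch : String) : List Int :=
  ((PySem.List.enumerate rhyme_scheme 0).filter (fun p => p.2 == ch)).map (·.1)

-- ordered = list(dict.fromkeys(rs)); histogram = {ch: [...] for ch in ordered}
def get_rhyme_scheme_info_alt (rhyme_scheme : List String) : List String × (List (String × List Int)) :=
  let ordered := PySem.List.dedup rhyme_scheme
  let histogram := ordered.foldl
    (fun (d : PySem.Dict String (List Int)) ch => d.insert ch (pvIdxs rhyme_scheme ch))
    PySem.Dict.empty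
  (ordered, histogram.items)

-- ===== PRECONDITION & SPEC =====
def Spec_get_rhyme_scheme_info (rhyme_scheme : List String) (out : List String × (List (String × List Int))) : Prop := out = get_rhyme_scheme_info_alt rhyme_scheme
instance (rhyme_scheme : List String) (out : List String × (List (String × List Int))) : Decidable (Spec_get_rhyme_scheme_info rhyme_scheme out) := by unfold Spec_get_rhyme_scheme_info; infer_instance

-- ===== CLAIM (what is proved, stated in full; the proofs are below) =====
def Claim_equal_get_rhyme_scheme_info : Prop := ∀ (rhyme_scheme : List String), Dom_get_rhyme_scheme_info rhyme_scheme → Spec_get_rhyme_scheme_info rhyme_scheme (get_rhyme_scheme_info rhyme_scheme)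

-- ===== LEMMAS AND PROOFS =====

-- A's loop body, and the dict-only loop it simulates, named for the proofs
def pvStepA (st : PySem.Dict String (List Int) × List String) (p : Int × String) :
    PySem.Dict String (List Int) × List String :=
  if st.1.contains p.2 = false then
    (st.1.insert p.2 [p.1], st.2 ++ [p.2])
  else
    (st.1.modify p.2 [] (fun l => l ++ [p.1]), st.2)

def pvStepB (d : PySem.Dict String (List Int)) (p : Int × String) : PySem.Dict String (List Int) :=
  d.modify p.2 [] (fun l => l ++ [p.1])

-- A's index loop over range(len) is the fold over enumerate(rhyme_scheme)
lemma pv_range_eq_enum {σ : Type} (f : σ → Int × String → σ) :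
    ∀ (tail pre : List String) (init : σ),
      (PySem.List.pyRange (pre.length : Int) ((pre.length : Int) + tail.length) 1).foldl
          (fun s i => f s (i, PySem.List.pyGetD (pre ++ tail) i "")) init
        = (PySem.List.enumerate tail (pre.length : Int)).foldl f init := by
  intro tail
  induction tail with
  | nil =>
      intro pre init
      simp only [List.length_nil, Nat.cast_zero, add_zero]
      rw [PySem.List.pyRange_one_eq_nil (le_refl _)]
      simp [PySem.List.enumerate]
  | cons t ts ih =>
      intro pre init
      have hlt : (pre.length : Int) < (pre.length : Int) + (t :: ts).length := by
        simp only [List.length_cons]; push_cast; omega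
      rw [PySem.List.pyRange_one_cons hlt]
      have hget : PySem.List.pyGetD (pre ++ t :: ts) (pre.length : Int) "" = t := by
        rw [PySem.List.pyGetD_eq_getElem (pre ++ t :: ts) "" (by omega)
              (by simp only [List.length_append, List.length_cons]; push_cast; omega)]
        simp
      simp only [List.foldl_cons, hget, PySem.List.enumerate_cons]
      have := ih (pre ++ [t]) (f init ((pre.length : Int), t))
      simp only [List.length_append, List.length_cons,
        List.append_assoc, List.singleton_append] at this ⊢
      rw [show ((pre.length : Int) + 1 : Int) = ((pre.length + 1 : Nat) : Int) by push_cast; ring] at *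
      rw [show ((pre.length : Int) + ((ts.length : Nat) + 1 : Nat) : Int)
            = ((pre.length + 1 : Nat) : Int) + (ts.length : Int) by push_cast; ring]
      exact this

-- loop invariant: A's ordered list is always the keys of its histogram
lemma pv_loop_inv :
    ∀ (l : List (Int × String)) (d : PySem.Dict String (List Int)) (ord : List String),
      ord = d.keys →
      l.foldl pvStepA (d, ord) = (l.foldl pvStepB d, (l.foldl pvStepB d).keys) := by
  intro l
  induction l with
  | nil => intro d ord h; simp [h]
  | cons p rest ih =>
      intro d ord h
      simp only [List.foldl_cons]
      by_cases hc : d.contains p.2 = false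
      · have hstepA : pvStepA (d, ord) p = (d.insert p.2 [p.1], ord ++ [p.2]) := by
          simp [pvStepA, hc]
        have hB : pvStepB d p = d.insert p.2 [p.1] := by
          show d.insert p.2 ((d.getD p.2 []) ++ [p.1]) = d.insert p.2 [p.1]
          rw [PySem.Dict.getD_of_not_contains d [] hc]
          simp
        rw [hstepA, hB]
        exact ih _ _ (by rw [h, PySem.Dict.keys_insert_of_not_contains d _ hc])
      · have hc' : d.contains p.2 = true := by revert hc; cases d.contains p.2 <;> simp
        have hstepA : pvStepA (d, ord) p = (d.modify p.2 [] (fun l => l ++ [p.1]), ord) := by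
          simp [pvStepA, hc]
        rw [hstepA]
        exact ih _ _ (by
          rw [h, PySem.Dict.keys_modify, PySem.Dict.keys_insert_of_contains d _ hc'])

-- the final dict of A's loop: its keys are dedup rs, its keys are Nodup, and each value is pvIdxs
lemma pv_keys_final (rs : List String) :
    ((PySem.List.enumerate rs 0).foldl pvStepB PySem.Dict.empty).keys = PySem.List.dedup rs := by
  have h := PySem.Dict.keys_foldl_modify_key (l := PySem.List.enumerate rs 0)
    (key := fun p => p.2) (d0 := ([] : List Int)) (f := fun _ p => (fun l => l ++ [p.1]))
    (d := (PySem.Dict.empty : PySem.Dict String (List Int)))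
  have e : List.foldl pvStepB PySem.Dict.empty (PySem.List.enumerate rs 0)
      = List.foldl (fun (d : PySem.Dict String (List Int)) p =>
          d.modify p.2 [] (fun l => l ++ [p.1])) PySem.Dict.empty (PySem.List.enumerate rs 0) := rfl
  rw [e, h]
  simp [PySem.List.map_snd_enumerate, PySem.Dict.keys_empty, PySem.Set.update_nil_left]

lemma pv_nodup_final (rs : List String) :
    ((PySem.List.enumerate rs 0).foldl pvStepB PySem.Dict.empty).keys.Nodup := by
  have h := PySem.Dict.nodup_keys_foldl_modify_key (l := PySem.List.enumerate rs 0)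
    (key := fun p => p.2) (d0 := ([] : List Int)) (f := fun _ p => (fun l => l ++ [p.1]))
    (d := (PySem.Dict.empty : PySem.Dict String (List Int)))
    (by simp [PySem.Dict.keys_empty])
  simpa [pvStepB] using h

lemma pv_getD_final (rs : List String) (ch : String) :
    ((PySem.List.enumerate rs 0).foldl pvStepB PySem.Dict.empty).getD ch [] = pvIdxs rs ch := by
  have hswap : (PySem.List.enumerate rs 0).foldl pvStepB PySem.Dict.empty
      = ((PySem.List.enumerate rs 0).map Prod.swap).foldl
          (fun (d : PySem.Dict String (List Int)) p => d.modify p.1 [] (fun l => l ++ [p.2]))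
          PySem.Dict.empty := by
    rw [List.foldl_map]; rfl
  rw [hswap, PySem.Dict.getD_foldl_modify_append]
  simp [pvIdxs, PySem.Dict.getD_empty, List.filter_map, List.map_map, Function.comp_def]

-- B's histogram fold inserts distinct fresh keys, so its items are the mapped list
lemma pv_items_alt (rs : List String) :
    ((PySem.List.dedup rs).foldl
        (fun (d : PySem.Dict String (List Int)) ch => d.insert ch (pvIdxs rs ch))
        PySem.Dict.empty).items
      = (PySem.List.dedup rs).map (fun ch => (ch, pvIdxs rs ch)) := by
  have h := PySem.Dict.items_foldl_insert_fresh (l := PySem.List.dedup rs)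
    (k := fun ch => ch) (v := fun ch => pvIdxs rs ch)
    (d := (PySem.Dict.empty : PySem.Dict String (List Int)))
    (by intro a _; simp [PySem.Dict.contains_empty])
    (by simp)
  simp at h
  exact h

-- ===== VERDICT (by name: the statement is the Claim_ definition above) =====
theorem get_rhyme_scheme_info_spec : Claim_equal_get_rhyme_scheme_info := by
  intro rs _
  show get_rhyme_scheme_info rs = get_rhyme_scheme_info_alt rs
  unfold get_rhyme_scheme_info get_rhyme_scheme_info_alt
  have h1 : (PySem.List.pyRange 0 rs.length 1).foldl
      (fun (st : PySem.Dict String (List Int) × List String) i =>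
        pvStepA st (i, PySem.List.pyGetD rs i ""))
      (PySem.Dict.empty, [])
      = (PySem.List.enumerate rs 0).foldl pvStepA (PySem.Dict.empty, []) := by
    have := pv_range_eq_enum pvStepA rs [] (PySem.Dict.empty, ([] : List String))
    simpa using this
  have h2 := pv_loop_inv (PySem.List.enumerate rs 0) PySem.Dict.empty []
    (by simp [PySem.Dict.keys_empty])
  show ((((PySem.List.pyRange 0 rs.length 1).foldl
            (fun (st : PySem.Dict String (List Int) × List String) i =>
              pvStepA st (i, PySem.List.pyGetD rs i ""))
            (PySem.Dict.empty, [])).2),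
        (((PySem.List.pyRange 0 rs.length 1).foldl
            (fun (st : PySem.Dict String (List Int) × List String) i =>
              pvStepA st (i, PySem.List.pyGetD rs i ""))
            (PySem.Dict.empty, [])).1.items))
      = (PySem.List.dedup rs,
         ((PySem.List.dedup rs).foldl
            (fun (d : PySem.Dict String (List Int)) ch => d.insert ch (pvIdxs rs ch))
            PySem.Dict.empty).items)
  rw [h1, h2, pv_items_alt]
  refine Prod.ext ?_ ?_
  · exact pv_keys_final rs
  · show ((PySem.List.enumerate rs 0).foldl pvStepB PySem.Dict.empty).items
        = (PySem.List.dedup rs).map (fun ch => (ch, pvIdxs rs ch))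
    rw [PySem.Dict.items_eq_map_keys _ (pv_nodup_final rs) ([] : List Int), pv_keys_final rs]
    exact List.map_congr_left (fun ch _ => by rw [pv_getD_final rs ch])
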